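-- pv_equiv track=rewrite | github.com/Luolingwei/LeetCode | Interview/Anthropic/Generate Function Profiling Events.py | stackEvents
-- ===== SOURCE A (Python) =====
-- from typing import List, Optional
--
-- def stackEvents(samples: List[str]) -> List[str]:
--     def collectRemainStacks(memo):
--         ops = "end:" + time + ":"
--         funcs = []
--         while memo.keys():
--             curFunc = list(memo.keys())[0]
--             funcs.append(curFunc)
--             memo = memo[curFunc]
--         res.extend([ops + func for func in funcs[::-1]])
--
--     root = {}
--     res = []
--     for sample in samples:
--         time, stack = sample.split(':')
--         funcs = [func for func in stack.split('->') if func]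
--         memo = root
--         for func in funcs:
--             if func in memo:
--                 memo = memo[func]
--             else:
--                 if memo:
--                     collectRemainStacks(memo)
--                     memo.clear()
--                 memo[func] = {}
--                 memo = memo[func]
--                 ops = "start:" + time + ":"
--                 res += [ops + func]
--         if memo:
--             collectRemainStacks(memo)
--             memo.clear()
--     return res
-- ===== SOURCE B (Python) =====
-- from typing import List
--
-- def stackEvents(samples: List[str]) -> List[str]:
--     res = []
--     prev = []
--     for sample in samples:
--         time, stack = sample.split(':')
--         funcs = [f for f in stack.split('->') if f]
--         p = 0
--         while p < len(prev) and p < len(funcs) and prev[p] == funcs[p]: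
--             p += 1
--         for f in reversed(prev[p:]):
--             res.append('end:' + time + ':' + f)
--         for f in funcs[p:]:
--             res.append('start:' + time + ':' + f)
--         prev = funcs
--     return res
-- ===== Notes on version B (the rewrite author's own statement) =====
-- stated objective: simpler
-- what changed: B replaces A's mutable nested-dict tree (with a closure walking the remaining singleton chain to flush end events) by a flat list holding the previous call stack: per sample it computes the longest common prefix with the new stack, emits end events for the dropped suffix in reverse and start events for the new suffix.
import Mathlib
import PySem

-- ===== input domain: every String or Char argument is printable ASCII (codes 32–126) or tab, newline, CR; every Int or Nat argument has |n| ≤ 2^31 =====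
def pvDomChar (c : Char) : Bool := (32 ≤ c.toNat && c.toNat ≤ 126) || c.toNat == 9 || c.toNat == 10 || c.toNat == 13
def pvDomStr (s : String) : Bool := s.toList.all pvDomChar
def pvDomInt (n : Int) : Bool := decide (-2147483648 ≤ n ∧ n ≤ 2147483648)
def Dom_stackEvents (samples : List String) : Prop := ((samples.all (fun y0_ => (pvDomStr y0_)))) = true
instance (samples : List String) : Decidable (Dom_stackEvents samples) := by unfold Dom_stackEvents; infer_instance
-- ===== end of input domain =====

-- B drops A's mutable nested-dict tree for a flat previous-call-stack list with a
-- longest-common-prefix scan (objective: simpler); return values agree on Pre_.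


-- ===== PORT A =====
-- Python's dict-of-dicts, as an association chain: `entry k v rest` is a dict whose
-- first key is k (mapped to dict v), rest being the remaining entries of the SAME dict.
inductive PvTree where
  | empty : PvTree
  | entry : String → PvTree → PvTree → PvTree
deriving DecidableEq, Repr

def PvTree.isEmpty : PvTree → Bool
  | .empty => true
  | .entry _ _ _ => false

-- `func in memo`
def PvTree.containsK : PvTree → String → Bool
  | .empty, _ => false
  | .entry k _ rest, f => k == f || rest.containsK f

-- `memo[func]` (first matching key)
def PvTree.getK : PvTree → String → PvTree
  | .empty, _ => .empty
  | .entry k v rest, f => if k == f then v else rest.getK f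

-- in-place update of the value at key f (the deeper mutation seen through the parent)
def PvTree.setK : PvTree → String → PvTree → PvTree
  | .empty, _, _ => .empty
  | .entry k v rest, f, v' => if k == f then .entry k v' rest else .entry k v (rest.setK f v')

-- the `while memo.keys(): curFunc = list(memo.keys())[0]; …` walk of collectRemainStacks
def pvCollectKeys : PvTree → List String
  | .empty => []
  | .entry k v _ => k :: pvCollectKeys v

-- collectRemainStacks: res.extend(["end:"+time+":"+f for f in funcs[::-1]])
def pvCollectRemain (time : String) (t : PvTree) : List String :=
  (pvCollectKeys t).reverse.map (fun f => "end:" ++ time ++ ":" ++ f)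

-- the `for func in funcs` loop over the memo pointer, plus the trailing
-- `if memo: collectRemainStacks(memo); memo.clear()`; returns (updated subtree, emitted events)
def pvWalkA (time : String) : PvTree → List String → PvTree × List String
  | t, [] => if t.isEmpty then (t, []) else (.empty, pvCollectRemain time t)
  | t, f :: fs =>
      if t.containsK f then
        let r := pvWalkA time (t.getK f) fs
        (t.setK f r.1, r.2)
      else
        let ev0 := if t.isEmpty then [] else pvCollectRemain time t
        let r := pvWalkA time PvTree.empty fs
        (.entry f r.1 .empty, ev0 ++ ["start:" ++ time ++ ":" ++ f] ++ r.2)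

def stackEvents (samples : List String) : List String :=
  (samples.foldl (fun (st : PvTree × List String) sample =>
      match PySem.Str.split? sample ":" with
      | some [time, stack] =>
          let funcs := ((PySem.Str.split? stack "->").getD []).filter (fun f => f != "")
          let r := pvWalkA time st.1 funcs
          (r.1, st.2 ++ r.2)
      | _ => st)   -- sample.split(':') does not yield two parts: Python raises; excluded by Pre_
    (.empty, [])).2

-- ===== PORT B =====
-- `time, stack = sample.split(':')`: the two parts, or none (ValueError)
def pvTwo? (o : Option (List String)) : Option (String × String) :=
  o.bind (fun l => if l.length = 2 then some (l.headI, l.tail.headI) else none)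

-- length of the longest common prefix (B's while loop)
def pvLcp : List String → List String → Nat
  | [], _ => 0
  | x :: xs, b =>
      match b with
      | [] => 0
      | y :: ys => if x == y then pvLcp xs ys + 1 else 0

def stackEvents_alt (samples : List String) : List String :=
  (samples.foldl (fun (st : List String × List String) sample =>
      -- `none` (no two parts): unreachable under Pre_ (Python B raises ValueError here too)
      (pvTwo? (PySem.Str.split? sample ":")).elim st (fun ts =>
          let time := ts.1
          let stack := ts.2
          let funcs := ((PySem.Str.split? stack "->").getD []).filter (fun f => f != "")
          let p := pvLcp st.1 funcs
          (funcs, st.2 ++ ((st.1.drop p).reverse.map (fun f => "end:" ++ time ++ ":" ++ f))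
                       ++ ((funcs.drop p).map (fun f => "start:" ++ time ++ ":" ++ f)))))
    ([], [])).2

-- ===== PRECONDITION & SPEC =====
-- Pre_ excludes exactly the samples on which `time, stack = sample.split(':')` raises
-- ValueError in both Pythons: those not containing exactly one ':'.
def Pre_stackEvents (samples : List String) : Prop :=
  ∀ s ∈ samples, ((PySem.Str.split? s ":").getD []).length = 2
instance (samples : List String) : Decidable (Pre_stackEvents samples) := by unfold Pre_stackEvents; infer_instance
def pvWitness_stackEvents : List String := ["1:a->b->c", "3:a->b", "5:a->x", "7:"]
def Spec_stackEvents (samples : List String) (out : List String) : Prop := out = stackEvents_alt samples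
instance (samples : List String) (out : List String) : Decidable (Spec_stackEvents samples out) := by unfold Spec_stackEvents; infer_instance

-- ===== CLAIM (what is proved, stated in full; the proofs are below) =====
def Claim_equal_stackEvents : Prop := ∀ (samples : List String), Dom_stackEvents samples → Pre_stackEvents samples → Spec_stackEvents samples (stackEvents samples)

-- ===== LEMMAS AND PROOFS =====

-- the chain tree encoding a linear call stack
def pvChain : List String → PvTree
  | [] => .empty
  | f :: fs => .entry f (pvChain fs) .empty

theorem pvCollectKeys_chain (l : List String) : pvCollectKeys (pvChain l) = l := by
  induction l with
  | nil => rfl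
  | cons f fs ih => simp [pvChain, pvCollectKeys, ih]

theorem pvWalkA_empty (time : String) (fs : List String) :
    pvWalkA time PvTree.empty fs
      = (pvChain fs, fs.map (fun f => "start:" ++ time ++ ":" ++ f)) := by
  induction fs with
  | nil => rfl
  | cons f fs ih =>
      simp [pvWalkA, PvTree.containsK, PvTree.isEmpty, ih, pvChain]

theorem pvWalkA_chain (time : String) (funcs prev : List String) :
    pvWalkA time (pvChain prev) funcs
      = (pvChain funcs,
         ((prev.drop (pvLcp prev funcs)).reverse.map (fun f => "end:" ++ time ++ ":" ++ f))
           ++ ((funcs.drop (pvLcp prev funcs)).map (fun f => "start:" ++ time ++ ":" ++ f))) := by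
  induction funcs generalizing prev with
  | nil =>
      cases prev with
      | nil => rfl
      | cons g gs =>
          simp [pvWalkA, pvChain, PvTree.isEmpty, pvLcp, pvCollectRemain,
                pvCollectKeys, pvCollectKeys_chain]
  | cons f fs ih =>
      cases prev with
      | nil =>
          simp [pvWalkA, pvChain, PvTree.containsK, PvTree.isEmpty, pvLcp,
                pvWalkA_empty]
      | cons g gs =>
          by_cases h : g = f
          · subst h
            simp [pvWalkA, pvChain, PvTree.containsK, PvTree.getK, PvTree.setK,
                  pvLcp, ih gs]
          · have hb : (g == f) = false := by simp [h]
            simp [pvWalkA, pvChain, PvTree.containsK, PvTree.isEmpty, hb, pvLcp,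
                  pvCollectRemain, pvCollectKeys, pvCollectKeys_chain, pvWalkA_empty]

theorem pvFold_eq (samples : List String) (prev res : List String) :
    (samples.foldl (fun (st : PvTree × List String) sample =>
        match PySem.Str.split? sample ":" with
        | some [time, stack] =>
            let funcs := ((PySem.Str.split? stack "->").getD []).filter (fun f => f != "")
            let r := pvWalkA time st.1 funcs
            (r.1, st.2 ++ r.2)
        | _ => st) (pvChain prev, res)).2
    = (samples.foldl (fun (st : List String × List String) sample =>
        (pvTwo? (PySem.Str.split? sample ":")).elim st (fun ts =>
            let time := ts.1
            let stack := ts.2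
            let funcs := ((PySem.Str.split? stack "->").getD []).filter (fun f => f != "")
            let p := pvLcp st.1 funcs
            (funcs, st.2 ++ ((st.1.drop p).reverse.map (fun f => "end:" ++ time ++ ":" ++ f))
                         ++ ((funcs.drop p).map (fun f => "start:" ++ time ++ ":" ++ f))))) (prev, res)).2 := by
  induction samples generalizing prev res with
  | nil => rfl
  | cons s ss ih =>
      simp only [List.foldl_cons]
      cases hsp : PySem.Str.split? s ":" with
      | none => simp only [pvTwo?]; exact ih prev res
      | some parts =>
          match parts with
          | [] => simp only [pvTwo?]; exact ih prev res
          | [_] => simp only [pvTwo?]; exact ih prev res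
          | [time, stack] =>
              simp only [pvTwo?, pvWalkA_chain]
              rw [← List.append_assoc]
              exact ih _ _
          | _ :: _ :: _ :: _ => simp only [pvTwo?]; exact ih prev res

-- ===== VERDICT (by name: the statement is the Claim_ definition above) =====
theorem stackEvents_spec : Claim_equal_stackEvents := by
  intro samples _ _
  unfold Spec_stackEvents stackEvents stackEvents_alt
  exact pvFold_eq samples [] []
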